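-- pv_equiv track=rewrite | github.com/cs19d502/colab | pdf_to_st.py | rung_to_expression
-- ===== SOURCE A (Python) =====
-- from typing import List
--
-- def _parse_instruction(instr: str) -> (str, str):
--     """Parse an instruction list line into opcode and operand."""
--     parts = instr.split(maxsplit=1)
--     if not parts:
--         return "", ""
--     opcode = parts[0].upper()
--     operand = parts[1].strip() if len(parts) > 1 else ""
--     return opcode, operand
--
-- def rung_to_expression(rung: List[str]):
--     """Convert a rung to ST expression and coil assignment."""
--     expr_parts: List[str] = []
--     coil_assignment = None
--
--     for instr in rung:
--         op, operand = _parse_instruction(instr)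
--         if op in {"LD", "LDP", "LDN"}:
--             if op == "LDN":
--                 expr_parts = [f"NOT {operand}"]
--             else:
--                 expr_parts = [operand]
--         elif op in {"AND", "ANDP", "ANDN"}:
--             if op == "ANDN":
--                 expr_parts.append(f"AND NOT {operand}")
--             else:
--                 expr_parts.append(f"AND {operand}")
--         elif op in {"OR", "ORP", "ORN"}:
--             if op == "ORN":
--                 expr_parts.append(f"OR NOT {operand}")
--             else:
--                 expr_parts.append(f"OR {operand}")
--         elif op in {"OUT", "SET", "RST", "OUTNOT"}:
--             coil_assignment = (op, operand)
--         # additional instructions could be handled here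
--
--     expr = " ".join(expr_parts)
--     return expr, coil_assignment
-- ===== SOURCE B (Python) =====
-- def _parse_instruction(instr):
--     parts = instr.split(maxsplit=1)
--     if not parts:
--         return "", ""
--     opcode = parts[0].upper()
--     operand = parts[1].strip() if len(parts) > 1 else ""
--     return opcode, operand
--
-- def _and_or_token(op, operand):
--     if op == "ANDN":
--         return "AND NOT " + operand
--     if op in ("AND", "ANDP"):
--         return "AND " + operand
--     if op == "ORN":
--         return "OR NOT " + operand
--     if op in ("OR", "ORP"):
--         return "OR " + operand
--     return None
--
-- def rung_to_expression(rung):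
--     """Staged passes: parse all instructions once, take the last coil
--     instruction as the assignment, locate the last LD instruction, and render
--     the expression from its token followed by the AND/OR tokens after it
--     (all AND/OR tokens if the rung has no LD)."""
--     parsed = [_parse_instruction(instr) for instr in rung]
--     coil = None
--     for op, od in parsed:
--         if op in ("OUT", "SET", "RST", "OUTNOT"):
--             coil = (op, od)
--     ld = None
--     for i, (op, od) in enumerate(parsed):
--         if op in ("LD", "LDP", "LDN"):
--             ld = (i, op, od)
--     if ld is None:
--         parts = [t for t in (_and_or_token(op, od) for op, od in parsed) if t is not None]
--     else:
--         i, op, od = ld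
--         head = "NOT " + od if op == "LDN" else od
--         parts = [head] + [t for t in (_and_or_token(op, od) for op, od in parsed[i + 1:]) if t is not None]
--     return " ".join(parts), coil
-- ===== Notes on version B (the rewrite author's own statement) =====
-- stated objective: alternative
-- what changed: A is one forward loop that mutates expr_parts (resetting at every LD) and overwrites the coil; B works in staged passes: parse every instruction once, pick the last coil instruction, find the last LD instruction, and build the expression as its token plus the AND/OR tokens of the suffix after it (all AND/OR tokens if no LD).
import Mathlib
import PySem

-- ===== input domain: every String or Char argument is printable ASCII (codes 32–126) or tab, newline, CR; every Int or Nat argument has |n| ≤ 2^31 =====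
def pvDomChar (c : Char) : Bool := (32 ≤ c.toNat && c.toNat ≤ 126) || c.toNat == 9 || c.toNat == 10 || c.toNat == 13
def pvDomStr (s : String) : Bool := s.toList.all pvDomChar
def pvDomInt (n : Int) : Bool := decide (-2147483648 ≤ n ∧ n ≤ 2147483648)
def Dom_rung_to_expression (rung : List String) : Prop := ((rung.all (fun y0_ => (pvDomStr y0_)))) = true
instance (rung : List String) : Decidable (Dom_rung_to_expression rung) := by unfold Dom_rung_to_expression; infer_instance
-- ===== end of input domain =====

-- B replaces A's forward accumulate-and-reset loop by staged passes: parse once,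
-- last coil pass, last-LD search, then render the suffix (objective: alternative).

-- ===== PORT A =====
-- _parse_instruction, shared by Source A and Source B
def pvParse (instr : String) : String × String :=
  match PySem.Str.split₀Max instr 1 with
  | [] => ("", "")
  | p0 :: rest =>
    (PySem.Str.upper p0,
     match rest with
     | [] => ""
     | p1 :: _ => PySem.Str.strip p1)

-- the body of A's for-loop, as a foldl step over (expr_parts, coil_assignment)
def pvStepA (s : List String × Option (String × String)) (instr : String) :
    List String × Option (String × String) :=
  let op := (pvParse instr).1
  let operand := (pvParse instr).2
  if op ∈ (["LD", "LDP", "LDN"] : List String) then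
    ((if op = "LDN" then ["NOT " ++ operand] else [operand]), s.2)
  else if op ∈ (["AND", "ANDP", "ANDN"] : List String) then
    (s.1 ++ [if op = "ANDN" then "AND NOT " ++ operand else "AND " ++ operand], s.2)
  else if op ∈ (["OR", "ORP", "ORN"] : List String) then
    (s.1 ++ [if op = "ORN" then "OR NOT " ++ operand else "OR " ++ operand], s.2)
  else if op ∈ (["OUT", "SET", "RST", "OUTNOT"] : List String) then
    (s.1, some (op, operand))
  else s

def rung_to_expression (rung : List String) : String × (Option (String × String)) :=
  let st := rung.foldl pvStepA ([], none)
  (PySem.Str.join " " st.1, st.2)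

-- ===== PORT B =====
-- _and_or_token from Source B
def pvTok (p : String × String) : Option String :=
  if p.1 = "ANDN" then some ("AND NOT " ++ p.2)
  else if p.1 ∈ (["AND", "ANDP"] : List String) then some ("AND " ++ p.2)
  else if p.1 = "ORN" then some ("OR NOT " ++ p.2)
  else if p.1 ∈ (["OR", "ORP"] : List String) then some ("OR " ++ p.2)
  else none

-- Source B's coil pass: the last coil instruction of the parsed rung
def pvLastCoil (parsed : List (String × String)) : Option (String × String) :=
  parsed.foldl
    (fun c p => if p.1 ∈ (["OUT", "SET", "RST", "OUTNOT"] : List String) then some p else c) none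

-- Source B's enumerate pass: the last LD instruction together with its index
def pvLastLd (parsed : List (String × String)) : Option (Nat × String × String) :=
  parsed.zipIdx.foldl
    (fun a pi => if pi.1.1 ∈ (["LD", "LDP", "LDN"] : List String) then some (pi.2, pi.1) else a) none

def rung_to_expression_alt (rung : List String) : String × (Option (String × String)) :=
  let parsed := rung.map pvParse
  let coil := pvLastCoil parsed
  let parts :=
    match pvLastLd parsed with
    | none => parsed.filterMap pvTok
    | some (i, op, od) =>
        (if op = "LDN" then "NOT " ++ od else od) :: (parsed.drop (i + 1)).filterMap pvTok
  (PySem.Str.join " " parts, coil)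

-- ===== PRECONDITION & SPEC =====
def Spec_rung_to_expression (rung : List String) (out : String × (Option (String × String))) : Prop := out = rung_to_expression_alt rung
instance (rung : List String) (out : String × (Option (String × String))) : Decidable (Spec_rung_to_expression rung out) := by unfold Spec_rung_to_expression; infer_instance

-- ===== CLAIM (what is proved, stated in full; the proofs are below) =====
def Claim_equal_rung_to_expression : Prop := ∀ (rung : List String), Dom_rung_to_expression rung → Spec_rung_to_expression rung (rung_to_expression rung)

-- ===== LEMMAS AND PROOFS =====

-- A's step as a function of the already-parsed pair (defeq to pvStepA)
def pvStepP (s : List String × Option (String × String)) (p : String × String) :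
    List String × Option (String × String) :=
  if p.1 ∈ (["LD", "LDP", "LDN"] : List String) then
    ((if p.1 = "LDN" then ["NOT " ++ p.2] else [p.2]), s.2)
  else if p.1 ∈ (["AND", "ANDP", "ANDN"] : List String) then
    (s.1 ++ [if p.1 = "ANDN" then "AND NOT " ++ p.2 else "AND " ++ p.2], s.2)
  else if p.1 ∈ (["OR", "ORP", "ORN"] : List String) then
    (s.1 ++ [if p.1 = "ORN" then "OR NOT " ++ p.2 else "OR " ++ p.2], s.2)
  else if p.1 ∈ (["OUT", "SET", "RST", "OUTNOT"] : List String) then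
    (s.1, some p)
  else s

theorem pvLastCoil_append (q : List (String × String)) (p : String × String) :
    pvLastCoil (q ++ [p]) =
      if p.1 ∈ (["OUT", "SET", "RST", "OUTNOT"] : List String) then some p else pvLastCoil q := by
  simp [pvLastCoil, List.foldl_append]

theorem pvLastLd_append (q : List (String × String)) (p : String × String) :
    pvLastLd (q ++ [p]) =
      if p.1 ∈ (["LD", "LDP", "LDN"] : List String) then some (q.length, p) else pvLastLd q := by
  simp [pvLastLd, List.zipIdx_append, List.foldl_append, List.zipIdx]

theorem pvLastLd_lt (q : List (String × String)) (i : Nat) (op od : String)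
    (h : pvLastLd q = some (i, op, od)) : i < q.length := by
  induction q using List.reverseRecOn with
  | nil => simp [pvLastLd] at h
  | append_singleton q p ih =>
    rw [pvLastLd_append] at h
    by_cases hp : p.1 ∈ (["LD", "LDP", "LDN"] : List String)
    · simp [hp] at h
      simp [h.1]
    · simp [hp] at h
      have := ih h
      simp; omega

theorem pvFoldP_char (q : List (String × String)) :
    ∀ s : List String × Option (String × String),
      q.foldl pvStepP s =
        ((match pvLastLd q with
          | none => s.1 ++ q.filterMap pvTok
          | some (i, op, od) =>
              (if op = "LDN" then "NOT " ++ od else od) :: (q.drop (i + 1)).filterMap pvTok),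
         (match pvLastCoil q with
          | none => s.2
          | some c => some c)) := by
  induction q using List.reverseRecOn with
  | nil => intro s; simp [pvLastLd, pvLastCoil]
  | append_singleton q p ih =>
    intro s
    obtain ⟨a, b⟩ := p
    rw [List.foldl_append, List.foldl_cons, List.foldl_nil, ih, pvLastLd_append, pvLastCoil_append]
    have hdropall : (q ++ [(a, b)]).drop (q.length + 1) = [] := by
      apply List.drop_eq_nil_of_le; simp
    have hdrop : ∀ (i : Nat) (op od : String), pvLastLd q = some (i, op, od) →
        (q ++ [(a, b)]).drop (i + 1) = q.drop (i + 1) ++ [(a, b)] := fun i op od h =>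
      List.drop_append_of_le_length (by have := pvLastLd_lt q i op od h; omega)
    by_cases h1 : a ∈ (["LD", "LDP", "LDN"] : List String)
    · simp only [List.mem_cons, List.not_mem_nil, or_false] at h1
      rcases h1 with h | h | h <;> subst h <;> simp [pvStepP, hdropall]
    · by_cases h2 : a ∈ (["AND", "ANDP", "ANDN", "OR", "ORP", "ORN"] : List String)
      · simp only [List.mem_cons, List.not_mem_nil, or_false] at h2
        rcases h2 with h | h | h | h | h | h <;> subst h <;>
          (cases hq : pvLastLd q with
           | none => simp [pvStepP, pvTok, List.filterMap_append]
           | some t =>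
             obtain ⟨i, op, od⟩ := t
             simp [pvStepP, pvTok, hdrop i op od hq, List.filterMap_append])
      · by_cases h3 : a ∈ (["OUT", "SET", "RST", "OUTNOT"] : List String)
        · simp only [List.mem_cons, List.not_mem_nil, or_false] at h3
          rcases h3 with h | h | h | h <;> subst h <;>
            (cases hq : pvLastLd q with
             | none => simp [pvStepP, pvTok, List.filterMap_append]
             | some t =>
               obtain ⟨i, op, od⟩ := t
               simp [pvStepP, pvTok, hdrop i op od hq, List.filterMap_append])
        · simp only [List.mem_cons, List.not_mem_nil, or_false] at h1 h2 h3
          push Not at h1 h2 h3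
          obtain ⟨e1, e2, e3⟩ := h1
          obtain ⟨e4, e5, e6, e7, e8, e9⟩ := h2
          obtain ⟨e10, e11, e12, e13⟩ := h3
          cases hq : pvLastLd q with
          | none =>
            simp [pvStepP, pvTok, List.filterMap_append,
                  e1, e2, e3, e4, e5, e6, e7, e8, e9, e10, e11, e12, e13]
          | some t =>
            obtain ⟨i, op, od⟩ := t
            simp [pvStepP, pvTok, hdrop i op od hq, List.filterMap_append,
                  e1, e2, e3, e4, e5, e6, e7, e8, e9, e10, e11, e12, e13]

-- ===== VERDICT (by name: the statement is the Claim_ definition above) =====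
theorem rung_to_expression_spec : Claim_equal_rung_to_expression := by
  intro rung _
  unfold Spec_rung_to_expression rung_to_expression rung_to_expression_alt
  have hf : rung.foldl pvStepA ([], none) = (rung.map pvParse).foldl pvStepP ([], none) := by
    rw [List.foldl_map]
    congr 1
  rw [hf, pvFoldP_char]
  rcases hc : pvLastCoil (rung.map pvParse) with _ | c <;> simp [hc]
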